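-- pv_equiv track=rewrite | github.com/mdrondinelli/c4y_ae0fbe | projects/ttt.py | column_owner
-- ===== SOURCE A (Python) =====
-- def space_owner(board_state, row_number, column_number):
--     return board_state[row_number * 3 + column_number]
--
-- def column_owner(board_state, col_number):
--     x_count = 0
--     o_count = 0
--     for row_number in range(3):
--         owner  = space_owner(board_state, row_number, col_number)
--         if owner == 'x':
--             x_count += 1
--         elif owner == 'o':
--             o_count += 1
--     if x_count == 3:
--         return 'x'
--     if o_count == 3:
--         return 'o'
--     else:
--         return ' '
-- ===== SOURCE B (Python) =====
-- def column_owner(board_state, col_number):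
--     cells = [board_state[r * 3 + col_number] for r in range(3)]
--     if cells[0] == cells[1] == cells[2] and cells[0] in ('x', 'o'):
--         return cells[0]
--     return ' '
-- ===== Notes on version B (the rewrite author's own statement) =====
-- stated objective: simpler
-- what changed: B gathers the three column cells and decides by an all-equal-and-is-a-player test instead of accumulating separate x/o counters to a threshold of 3.
import Mathlib
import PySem

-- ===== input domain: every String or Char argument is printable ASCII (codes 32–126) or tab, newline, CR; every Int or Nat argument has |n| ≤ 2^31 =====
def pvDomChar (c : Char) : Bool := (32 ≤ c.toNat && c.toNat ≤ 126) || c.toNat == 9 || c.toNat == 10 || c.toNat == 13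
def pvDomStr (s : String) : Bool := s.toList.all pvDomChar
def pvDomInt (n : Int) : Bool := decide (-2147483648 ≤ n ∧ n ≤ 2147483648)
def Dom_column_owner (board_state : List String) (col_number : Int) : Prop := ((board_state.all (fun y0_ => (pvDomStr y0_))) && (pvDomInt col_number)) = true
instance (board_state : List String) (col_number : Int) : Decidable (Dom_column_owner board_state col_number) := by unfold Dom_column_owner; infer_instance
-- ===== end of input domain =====

-- B decides by an all-equal-and-is-a-player test on the three column cells instead of A's x/o counters.

-- ===== PORT A =====
def space_owner (board_state : List String) (row_number column_number : Int) : String :=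
  PySem.List.pyGetD board_state (row_number * 3 + column_number) ""

def column_owner (board_state : List String) (col_number : Int) : String :=
  let counts := (PySem.List.pyRange 0 3 1).foldl
    (fun (st : Int × Int) row_number =>
      let owner := space_owner board_state row_number col_number
      if owner = "x" then (st.1 + 1, st.2)
      else if owner = "o" then (st.1, st.2 + 1)
      else st) (0, 0)
  if counts.1 = 3 then "x"
  else if counts.2 = 3 then "o"
  else " "

-- ===== PORT B =====
def column_owner_alt (board_state : List String) (col_number : Int) : String :=
  let cells := (PySem.List.pyRange 0 3 1).map
    (fun r => PySem.List.pyGetD board_state (r * 3 + col_number) "")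
  if (PySem.List.pyGetD cells 0 "" = PySem.List.pyGetD cells 1 ""
      ∧ PySem.List.pyGetD cells 1 "" = PySem.List.pyGetD cells 2 "")
      ∧ (PySem.List.pyGetD cells 0 "" = "x" ∨ PySem.List.pyGetD cells 0 "" = "o") then
    PySem.List.pyGetD cells 0 ""
  else " "

-- ===== PRECONDITION & SPEC =====
-- Pre_ excludes exactly the inputs where both Pythons raise IndexError (a column index outside the board).
def Pre_column_owner (board_state : List String) (col_number : Int) : Prop :=
  PySem.Raise.InRange board_state.length col_number ∧
  PySem.Raise.InRange board_state.length (3 + col_number) ∧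
  PySem.Raise.InRange board_state.length (6 + col_number)
instance (board_state : List String) (col_number : Int) : Decidable (Pre_column_owner board_state col_number) := by unfold Pre_column_owner; infer_instance
def pvWitness_column_owner : List String × Int :=
  (["x", "o", " ", "x", "o", " ", "x", "o", " "], 0)

def Spec_column_owner (board_state : List String) (col_number : Int) (out : String) : Prop := out = column_owner_alt board_state col_number
instance (board_state : List String) (col_number : Int) (out : String) : Decidable (Spec_column_owner board_state col_number out) := by unfold Spec_column_owner; infer_instance

-- ===== CLAIM (what is proved, stated in full; the proofs are below) =====
def Claim_equal_column_owner : Prop := ∀ (board_state : List String) (col_number : Int), Dom_column_owner board_state col_number → Pre_column_owner board_state col_number → Spec_column_owner board_state col_number (column_owner board_state col_number)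

-- ===== LEMMAS AND PROOFS =====

theorem column_owner_core (s0 s1 s2 : String) :
    (let counts := [s0, s1, s2].foldl
        (fun (st : Int × Int) owner =>
          if owner = "x" then (st.1 + 1, st.2)
          else if owner = "o" then (st.1, st.2 + 1)
          else st) (0, 0)
      if counts.1 = 3 then "x" else if counts.2 = 3 then "o" else " ")
    = (if (s0 = s1 ∧ s1 = s2) ∧ (s0 = "x" ∨ s0 = "o") then s0 else " ") := by
  simp only [List.foldl]
  split_ifs <;> first
    | rfl
    | omega
    | (rename_i h; obtain ⟨⟨e01, e12⟩, hp⟩ := h; subst e01; subst e12; simp_all)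
    | simp_all

theorem column_owner_spec : Claim_equal_column_owner := by
  intro board_state col_number _ hpre
  unfold Spec_column_owner column_owner column_owner_alt space_owner
  obtain ⟨h0, h1, h2⟩ := hpre
  have e : PySem.List.pyRange 0 3 1 = [0, 1, 2] := by decide
  rw [e]
  have := column_owner_core
    (PySem.List.pyGetD board_state (0 * 3 + col_number) "")
    (PySem.List.pyGetD board_state (1 * 3 + col_number) "")
    (PySem.List.pyGetD board_state (2 * 3 + col_number) "")
  simp only [List.foldl, List.map] at this ⊢
  simp only [PySem.List.pyGetD] at *
  convert this using 2
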